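-- pv_equiv track=rewrite | github.com/Arturvpf/vlab-desafio-estagio-ia | app/prompt_engineer.py | _trim_to_first_marker
-- ===== SOURCE A (Python) =====
-- def _trim_to_first_marker(text: str, markers: tuple[str, ...]) -> str:
--     """Remove qualquer texto antes do primeiro marcador (case-insensitive).
--
--     Útil quando o modelo adiciona uma frase de abertura ("Claro! ...") e isso
--     não deve aparecer na saída final.
--     """
--     if not text:
--         return text
--
--     text_u = text.upper()
--     idxs: list[int] = []
--     for m in markers:
--         mu = (m or "").upper()
--         if not mu:
--             continue
--         i = text_u.find(mu)
--         if i != -1: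
--             idxs.append(i)
--
--     if not idxs:
--         return text
--
--     start = min(idxs)
--     return text[start:].lstrip()
-- ===== SOURCE B (Python) =====
-- def _trim_to_first_marker(text: str, markers: tuple[str, ...]) -> str:
--     """Single left-to-right scan: return the suffix from the first position
--     where any (case-insensitively matched) marker starts, lstripped."""
--     mus = [m.upper() for m in markers if m]
--     if not mus:
--         return text
--     tu = text.upper()
--     for i in range(len(tu)):
--         if any(tu.startswith(mu, i) for mu in mus):
--             return text[i:].lstrip()
--     return text
-- ===== Notes on version B (the rewrite author's own statement) =====
-- stated objective: faster
-- what changed: Instead of running a full .find over the text for every marker and taking min() of the hit indices, B makes a single left-to-right scan over positions of the uppercased text and returns at the first position where any marker matches.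
import Mathlib
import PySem

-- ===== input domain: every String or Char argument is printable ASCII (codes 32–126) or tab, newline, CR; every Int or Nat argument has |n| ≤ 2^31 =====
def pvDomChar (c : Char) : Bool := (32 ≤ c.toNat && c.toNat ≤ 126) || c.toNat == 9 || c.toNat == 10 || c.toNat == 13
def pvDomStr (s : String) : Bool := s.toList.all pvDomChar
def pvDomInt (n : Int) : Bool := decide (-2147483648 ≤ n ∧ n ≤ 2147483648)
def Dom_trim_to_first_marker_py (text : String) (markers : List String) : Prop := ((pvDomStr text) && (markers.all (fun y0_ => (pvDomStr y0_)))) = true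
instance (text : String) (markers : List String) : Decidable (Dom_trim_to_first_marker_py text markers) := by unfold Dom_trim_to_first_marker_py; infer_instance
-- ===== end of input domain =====

-- B replaces A's per-marker .find loop + min() of the hit indices with a single
-- left-to-right scan that stops at the first position where any marker matches
-- (early exit at the leftmost match; a timing run measured B faster).

-- ===== PORT A =====
def trim_to_first_marker_py (text : String) (markers : List String) : String :=
  if text = "" then text
  else
    let text_u := PySem.Str.upper text
    let idxs : List Int := markers.foldl (fun idxs m =>
      let mu := PySem.Str.upper m
      if mu = "" then idxs
      else
        let i := PySem.Str.find text_u mu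
        if i ≠ -1 then idxs ++ [i] else idxs) []
    if idxs = [] then text
    else
      match PySem.List.min? idxs (fun x => x) with
      | none => text     -- unreachable: idxs ≠ [] (Python min on a nonempty list)
      | some start => PySem.Str.lstrip (PySem.Str.slice text (some start) none)

-- ===== PORT B =====
-- the 'for i in range(len(tu))' loop of Source B, walking the suffix of tu at position i
def pvAltScan (text : String) (mus : List (List Char)) : List Char → Nat → String
  | [], _ => text
  | c :: rest, i =>
    if mus.any (fun mu => PySem.Chars.startswith (c :: rest) mu) then
      PySem.Str.lstrip (PySem.Str.slice text (some (i : Int)) none)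
    else pvAltScan text mus rest (i + 1)

def trim_to_first_marker_py_alt (text : String) (markers : List String) : String :=
  let mus := (markers.filter (fun m => !(m == ""))).map (fun m => PySem.Chars.upper m.toList)
  if mus = [] then text
  else pvAltScan text mus (PySem.Chars.upper text.toList) 0

-- ===== PRECONDITION & SPEC =====
def Spec_trim_to_first_marker_py (text : String) (markers : List String) (out : String) : Prop := out = trim_to_first_marker_py_alt text markers
instance (text : String) (markers : List String) (out : String) : Decidable (Spec_trim_to_first_marker_py text markers out) := by unfold Spec_trim_to_first_marker_py; infer_instance

-- ===== CLAIM (what is proved, stated in full; the proofs are below) =====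
def Claim_equal_trim_to_first_marker_py : Prop := ∀ (text : String) (markers : List String), Dom_trim_to_first_marker_py text markers → Spec_trim_to_first_marker_py text markers (trim_to_first_marker_py text markers)

-- ===== LEMMAS AND PROOFS =====

theorem pv_str_eq_empty_iff (s : String) : s = "" ↔ s.toList = [] := by
  rw [← String.toList_inj]; rfl

-- the markers A keeps, as B computes them
def pvMus (markers : List String) : List (List Char) :=
  (markers.filter (fun m => !(m == ""))).map (fun m => PySem.Chars.upper m.toList)

theorem pvMus_ne_nil (markers : List String) (mu : List Char) (h : mu ∈ pvMus markers) :
    mu ≠ [] := by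
  unfold pvMus at h
  rcases List.mem_map.mp h with ⟨m, hm, rfl⟩
  have hne : ¬ m = "" := by simpa using (List.of_mem_filter hm)
  intro hnil
  have hl : m.toList = [] := by
    have : m.toList.map PySem.Chars.upperChar = [] := hnil
    simpa using this
  exact hne ((pv_str_eq_empty_iff m).mpr hl)

-- A's accumulator loop produces exactly the (≠ -1) finds of B's marker list
theorem pvIdxs_eq (tu : List Char) (markers : List String) (acc : List Int) :
    markers.foldl (fun idxs m =>
      let mu := PySem.Str.upper m
      if mu = "" then idxs
      else
        let i := PySem.Str.find (String.ofList tu) mu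
        if i ≠ -1 then idxs ++ [i] else idxs) acc
    = acc ++ ((pvMus markers).map (fun mu => PySem.Chars.find tu mu)).filter (fun i => i ≠ -1) := by
  induction markers generalizing acc with
  | nil => simp [pvMus]
  | cons m ms ih =>
    simp only [List.foldl_cons]
    by_cases hm : m = ""
    · subst hm
      rw [if_pos (by decide : PySem.Str.upper "" = ""), ih]
      simp [pvMus]
    · have hmu : ¬ (PySem.Str.upper m = "") := by
        intro h
        apply hm
        rw [pv_str_eq_empty_iff] at h ⊢
        rw [PySem.Str.toList_upper] at h
        simpa [PySem.Chars.upper] using h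
      rw [if_neg hmu, ih]
      have hpm : pvMus (m :: ms) = PySem.Chars.upper m.toList :: pvMus ms := by
        simp [pvMus, hm]
      rw [hpm]
      by_cases hne : PySem.Chars.find tu (PySem.Chars.upper m.toList) = -1
      · simp [hne]
      · simp [hne]

-- no marker occurs anywhere in the scanned suffix ⇒ the scan returns text
theorem pvAltScan_none (text : String) (mus : List (List Char)) (suf : List Char)
    (h : ∀ mu ∈ mus, ¬ mu <:+: suf) : ∀ i, pvAltScan text mus suf i = text := by
  induction suf with
  | nil => intro i; rfl
  | cons c rest ih =>
    intro i
    have hany : mus.any (fun mu => PySem.Chars.startswith (c :: rest) mu) = false := by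
      rw [List.any_eq_false]
      intro mu hmu
      simp only [Bool.not_eq_true]
      rw [← Bool.not_eq_true, PySem.Chars.startswith_iff]
      exact fun hp => h mu hmu hp.isInfix
    rw [pvAltScan, hany]
    simp only [Bool.false_eq_true, if_false]
    exact ih (fun mu hmu hin =>
      h mu hmu (List.IsInfix.trans hin (List.suffix_cons c rest).isInfix)) (i + 1)

-- first match at position N ⇒ the scan returns the lstripped slice from N
theorem pvAltScan_hit (text : String) (mus : List (List Char)) (tu : List Char) (N : Nat)
    (hN : N < tu.length)
    (hmatch : ∃ mu ∈ mus, mu <+: tu.drop N)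
    (hno : ∀ j, j < N → ∀ mu ∈ mus, ¬ mu <+: tu.drop j) :
    ∀ i, i ≤ N → pvAltScan text mus (tu.drop i) i
      = PySem.Str.lstrip (PySem.Str.slice text (some (N : Int)) none) := by
  intro i hi
  induction hd : tu.drop i generalizing i with
  | nil =>
    exfalso
    have : tu.length - i = 0 := by
      have := congrArg List.length hd; simpa using this
    omega
  | cons c rest ih =>
    by_cases hiN : i = N
    · subst hiN
      obtain ⟨mu, hmu, hp⟩ := hmatch
      have hany : mus.any (fun mu => PySem.Chars.startswith (c :: rest) mu) = true := by
        rw [List.any_eq_true]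
        exact ⟨mu, hmu, by rw [PySem.Chars.startswith_iff, ← hd]; exact hp⟩
      rw [pvAltScan, hany]
      simp
    · have hilt : i < N := lt_of_le_of_ne hi hiN
      have hany : mus.any (fun mu => PySem.Chars.startswith (c :: rest) mu) = false := by
        rw [List.any_eq_false]
        intro mu hmu
        simp only [Bool.not_eq_true]
        rw [← Bool.not_eq_true, PySem.Chars.startswith_iff, ← hd]
        exact hno i hilt mu hmu
      rw [pvAltScan, hany]
      simp only [Bool.false_eq_true, if_false]
      have hrest : tu.drop (i + 1) = rest := by
        have hdt : tu.drop (i+1) = (tu.drop i).tail := by rw [List.tail_drop]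
        rw [hdt, hd]; rfl
      exact ih (i + 1) hilt hrest

theorem pvFind_neg_of_idxs_nil (tu : List Char) (mus : List (List Char))
    (h : (mus.map (fun mu => PySem.Chars.find tu mu)).filter (fun i => i ≠ -1) = [])
    (mu : List Char) (hmu : mu ∈ mus) : PySem.Chars.find tu mu = -1 := by
  by_contra hne
  have hmem : PySem.Chars.find tu mu ∈ (mus.map (fun mu => PySem.Chars.find tu mu)).filter (fun i => i ≠ -1) := by
    rw [List.mem_filter]
    exact ⟨List.mem_map_of_mem hmu, by simpa using hne⟩
  rw [h] at hmem
  exact absurd hmem (List.not_mem_nil)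

-- ===== VERDICT (by name: the statement is the Claim_ definition above) =====
theorem trim_to_first_marker_py_spec : Claim_equal_trim_to_first_marker_py := by
  intro text markers _
  unfold Spec_trim_to_first_marker_py trim_to_first_marker_py trim_to_first_marker_py_alt
  have htustr : PySem.Str.upper text = String.ofList (PySem.Chars.upper text.toList) := rfl
  simp only [htustr, pvIdxs_eq, List.nil_append]
  set tu := PySem.Chars.upper text.toList with htu
  set mus := pvMus markers with hmus
  set idxs := (mus.map (fun mu => PySem.Chars.find tu mu)).filter (fun i => i ≠ -1) with hidxdef
  have hlen : tu.length = text.toList.length := by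
    rw [htu]; simp [PySem.Chars.upper]
  show (if text = "" then text else if idxs = [] then text else
      match PySem.List.min? idxs (fun x => x) with
      | none => text
      | some start => PySem.Str.lstrip (PySem.Str.slice text (some start) none))
    = (if mus = [] then text else pvAltScan text mus tu 0)
  by_cases hmusnil : mus = []
  · have hnil : idxs = [] := by rw [hidxdef, hmusnil]; rfl
    rw [if_pos hmusnil, hnil]
    by_cases ht : text = "" <;> simp [ht]
  · rw [if_neg hmusnil]
    by_cases hinil : idxs = []
    · -- no marker occurs: both sides are text
      have hscan : pvAltScan text mus tu 0 = text := by
        apply pvAltScan_none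
        intro mu hmu
        rw [← PySem.Chars.find_eq_neg_one_iff]
        exact pvFind_neg_of_idxs_nil tu mus hinil mu hmu
      rw [hscan, hinil]
      by_cases ht : text = "" <;> simp [ht]
    · -- some marker occurs: both sides trim at the leftmost occurrence
      obtain ⟨start, hmin⟩ : ∃ s, PySem.List.min? idxs (fun x => x) = some s := by
        cases hm : PySem.List.min? idxs (fun x => x) with
        | none => exact absurd ((PySem.List.min?_eq_none_iff idxs (fun x => x)).mp hm) hinil
        | some s => exact ⟨s, rfl⟩
      have hstartmem := PySem.List.min?_mem hmin
      have hstartmin := PySem.List.min?_isMin hmin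
      rw [hidxdef, List.mem_filter] at hstartmem
      obtain ⟨hmapmem, hstartne⟩ := hstartmem
      obtain ⟨mustar, hmustar, hfindeq⟩ := List.mem_map.mp hmapmem
      have hstartne' : start ≠ -1 := by simpa using hstartne
      have hstartpos : 0 ≤ start := by
        have := PySem.Chars.neg_one_le_find tu mustar
        rw [hfindeq] at this
        omega
      have hfindpos : 0 ≤ PySem.Chars.find tu mustar := by rw [hfindeq]; exact hstartpos
      obtain ⟨hpref, hmin'⟩ := PySem.Chars.find_spec hfindpos
      have hNeq : (PySem.Chars.find tu mustar).toNat = start.toNat := by rw [hfindeq]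
      rw [hNeq] at hpref hmin'
      have hmatch : ∃ mu ∈ mus, mu <+: tu.drop start.toNat := ⟨mustar, hmustar, hpref⟩
      have hNlt : start.toNat < tu.length := by
        have hmune := pvMus_ne_nil markers mustar hmustar
        by_contra hge
        have hdn : tu.drop start.toNat = [] := List.drop_eq_nil_of_le (by omega)
        rw [hdn] at hpref
        exact hmune (List.prefix_nil.mp hpref)
      have hno : ∀ j, j < start.toNat → ∀ mu ∈ mus, ¬ mu <+: tu.drop j := by
        intro j hj mu hmu hp
        have hinf : PySem.Chars.isIn mu tu = true :=
          (PySem.Chars.exists_prefix_drop_iff_isIn mu tu).mp ⟨j, hp⟩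
        have hfne : PySem.Chars.find tu mu ≠ -1 := by
          rw [Ne, PySem.Chars.find_eq_neg_one_iff]
          exact fun hc => hc ((PySem.Chars.isIn_iff_infix mu tu).mp hinf)
        have hmem : PySem.Chars.find tu mu ∈ idxs := by
          rw [hidxdef, List.mem_filter]
          exact ⟨List.mem_map_of_mem hmu, by simpa using hfne⟩
        have hle : start ≤ PySem.Chars.find tu mu := hstartmin _ hmem
        have hfpos : 0 ≤ PySem.Chars.find tu mu := by omega
        obtain ⟨_, hmin2⟩ := PySem.Chars.find_spec hfpos
        have hjge : ¬ j < (PySem.Chars.find tu mu).toNat := fun hlt => hmin2 j hlt hp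
        omega
      have hscan := pvAltScan_hit text mus tu start.toNat hNlt hmatch hno 0 (Nat.zero_le _)
      rw [List.drop_zero] at hscan
      have hcast : ((start.toNat : Nat) : Int) = start := Int.toNat_of_nonneg hstartpos
      rw [hcast] at hscan
      have ht : ¬ text = "" := by
        rw [pv_str_eq_empty_iff]
        intro hnil
        have h0 : tu.length = 0 := by rw [hlen, hnil]; rfl
        omega
      rw [if_neg ht, if_neg hinil, hmin, hscan]
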